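-- pv_equiv track=rewrite | github.com/yzj0405/Mahjong-Assistant-preview | server/mahjong_state_tracker.py | _get_diff_tiles
-- ===== SOURCE A (Python) =====
-- from typing import List, Optional, Dict, Any, Union
-- from collections import Counter
--
-- def _get_diff_tiles(old_list: List[int], new_list: List[int]) -> List[int]:
--     """
--     Calculate newly added tiles (new_list - old_list) based on 34-tile types.
--     Returns a list of 136-IDs representing the added tiles.
--     """
--     old_c = Counter([t // 4 for t in old_list])
--     new_c = Counter([t // 4 for t in new_list])
--
--     diff_ids = []
--     # Find which 34-indices increased in count
--     for t34, count in new_c.items():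
--         old_count = old_c.get(t34, 0)
--         if count > old_count:
--             diff = count - old_count
--             # We need to find 'diff' number of tiles of type t34 in new_list
--             # that are potentially "new".
--             # To be precise with 136-IDs, we try to pick ones not in old_list if possible,
--             # or just pick any matching t34 from new_list.
--             # Since we normalize inputs freshly each time, 136-IDs might shift (0 vs 1).
--             # So we just construct representative IDs or pick from new_list.
--
--             # Pick specific IDs from new_list that match t34
--             candidates = [t for t in new_list if t // 4 == t34]
--             # Take the last 'diff' ones (arbitrary, but works for representation)
--             diff_ids.extend(candidates[:diff])
--
--     return sorted(diff_ids)
-- ===== SOURCE B (Python) =====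
-- from collections import Counter
--
-- def _get_diff_tiles(old_list, new_list):
--     # Group new_list tile IDs by 34-type once, instead of rescanning new_list per increased type.
--     groups = {}
--     for t in new_list:
--         groups.setdefault(t // 4, []).append(t)
--     old_c = Counter(t // 4 for t in old_list)
--     diff_ids = []
--     for t34, tiles in groups.items():
--         old_count = old_c.get(t34, 0)
--         if len(tiles) > old_count:
--             diff_ids.extend(tiles[:len(tiles) - old_count])
--     return sorted(diff_ids)
-- ===== Notes on version B (the rewrite author's own statement) =====
-- stated objective: faster
-- what changed: B builds a dict grouping new_list tile IDs by 34-type in one pass and reads each group's length, so the per-increased-type rescan of new_list (A's 'candidates' list comprehension inside the loop) disappears.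
import Mathlib
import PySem

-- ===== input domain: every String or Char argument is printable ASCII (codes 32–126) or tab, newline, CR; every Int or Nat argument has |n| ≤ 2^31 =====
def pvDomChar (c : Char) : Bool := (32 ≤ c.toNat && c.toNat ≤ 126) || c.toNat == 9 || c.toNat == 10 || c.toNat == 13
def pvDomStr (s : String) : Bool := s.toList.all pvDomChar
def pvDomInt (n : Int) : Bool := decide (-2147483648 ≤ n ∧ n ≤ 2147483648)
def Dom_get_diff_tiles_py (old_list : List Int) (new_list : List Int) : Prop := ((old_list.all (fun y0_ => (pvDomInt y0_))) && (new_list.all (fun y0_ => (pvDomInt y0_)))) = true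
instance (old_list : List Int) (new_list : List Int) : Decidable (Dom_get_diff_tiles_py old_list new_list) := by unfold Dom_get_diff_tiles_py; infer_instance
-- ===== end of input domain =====

-- B groups new_list by 34-type in one pass (dict of lists) instead of rescanning new_list per increased type; return value only.


-- ===== PORT A =====
def get_diff_tiles_py (old_list : List Int) (new_list : List Int) : List Int :=
  let old_c := PySem.Dict.counter (old_list.map (fun t => PySem.Int.floordiv t 4))
  let new_c := PySem.Dict.counter (new_list.map (fun t => PySem.Int.floordiv t 4))
  let diff_ids := new_c.items.foldl (fun acc p =>
    let t34 := p.1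
    let count := p.2
    let old_count := old_c.getD t34 0
    if count > old_count then
      let diff := count - old_count
      let candidates := new_list.filter (fun t => PySem.Int.floordiv t 4 == t34)
      acc ++ PySem.List.slice candidates none (some diff)
    else acc) []
  PySem.List.sorted diff_ids (fun x => x) false

-- ===== PORT B =====
def get_diff_tiles_py_alt (old_list : List Int) (new_list : List Int) : List Int :=
  let groups := new_list.foldl
    (fun d t => d.modify (PySem.Int.floordiv t 4) [] (fun l => l ++ [t])) PySem.Dict.empty
  let old_c := PySem.Dict.counter (old_list.map (fun t => PySem.Int.floordiv t 4))
  let diff_ids := groups.items.foldl (fun acc p =>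
    let tiles := p.2
    let old_count := old_c.getD p.1 0
    if (tiles.length : Int) > old_count then
      acc ++ tiles.take ((tiles.length : Int) - old_count).toNat
    else acc) []
  PySem.List.sorted diff_ids (fun x => x) false

-- ===== PRECONDITION & SPEC =====
def Spec_get_diff_tiles_py (old_list : List Int) (new_list : List Int) (out : List Int) : Prop := out = get_diff_tiles_py_alt old_list new_list
instance (old_list : List Int) (new_list : List Int) (out : List Int) : Decidable (Spec_get_diff_tiles_py old_list new_list out) := by unfold Spec_get_diff_tiles_py; infer_instance

-- ===== CLAIM (what is proved, stated in full; the proofs are below) =====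
def Claim_equal_get_diff_tiles_py : Prop := ∀ (old_list : List Int) (new_list : List Int), Dom_get_diff_tiles_py old_list new_list → Spec_get_diff_tiles_py old_list new_list (get_diff_tiles_py old_list new_list)

-- ===== LEMMAS AND PROOFS =====

-- ===== VERDICT (by name: the statement is the Claim_ definition above) =====
theorem get_diff_tiles_py_spec : Claim_equal_get_diff_tiles_py := by
  intro old_list new_list _
  unfold Spec_get_diff_tiles_py get_diff_tiles_py get_diff_tiles_py_alt
  simp only []
  congr 1
  have hnodup : (new_list.foldl (fun d t => d.modify (PySem.Int.floordiv t 4) [] (fun l => l ++ [t]))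
      PySem.Dict.empty).keys.Nodup :=
    PySem.Dict.nodup_keys_foldl_modify_key new_list (fun t => PySem.Int.floordiv t 4) []
      (fun d t l => l ++ [t]) PySem.Dict.empty PySem.Dict.nodup_keys_empty
  have hkeys : (new_list.foldl (fun d t => d.modify (PySem.Int.floordiv t 4) [] (fun l => l ++ [t]))
      PySem.Dict.empty).keys
      = PySem.Set.ofList (new_list.map (fun t => PySem.Int.floordiv t 4)) := by
    have h := PySem.Dict.keys_foldl_modify_key (l := new_list)
      (key := fun t => PySem.Int.floordiv t 4) (d0 := []) (f := fun d t l => l ++ [t]) (d := PySem.Dict.empty)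
    simpa [PySem.Set.update, PySem.Set.ofList_eq_foldl] using h
  have hgetD : ∀ k : Int, ((new_list.foldl (fun d t => d.modify (PySem.Int.floordiv t 4) [] (fun l => l ++ [t]))
        PySem.Dict.empty).getD k [])
      = new_list.filter (fun t => PySem.Int.floordiv t 4 == k) := by
    intro k
    have h := PySem.Dict.getD_foldl_modify_append
      (l := new_list.map (fun t => (PySem.Int.floordiv t 4, t))) (d := PySem.Dict.empty) (c := k)
    rw [List.foldl_map] at h
    simpa [List.filter_map, Function.comp_def] using h
  rw [PySem.Dict.items_counter, PySem.Dict.items_eq_map_keys _ hnodup ([] : List Int), hkeys]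
  rw [List.foldl_map, List.foldl_map]
  apply PySem.List.foldl_congr_mem
  intro acc k _
  dsimp only
  rw [hgetD, PySem.Dict.getD_counter]
  have hcount : ((new_list.map (fun t => PySem.Int.floordiv t 4)).count k : Int)
      = ((new_list.filter (fun t => PySem.Int.floordiv t 4 == k)).length : Int) := by
    simp [List.count, List.countP_map, Function.comp_def, ← List.countP_eq_length_filter]
  rw [hcount]
  split_ifs with h
  · congr 1
    have hpos : 0 < ((new_list.filter (fun t => PySem.Int.floordiv t 4 == k)).length : Int)
        - (old_list.map (fun t => PySem.Int.floordiv t 4)).count k := by omega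
    set d := ((new_list.filter (fun t => PySem.Int.floordiv t 4 == k)).length : Int)
        - (old_list.map (fun t => PySem.Int.floordiv t 4)).count k with hd
    rw [show d = ((d.toNat : Nat) : Int) by omega, PySem.List.slice_to_natCast]
    simp
    omega
  · rfl
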